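-- pv_equiv track=rewrite | github.com/Akshattekriwal01/leetcode | Others - Number of subsequence with Min and Max equal to K.py | numSubseqNoGreaterThan
-- ===== SOURCE A (Python) =====
-- from typing import List
--
-- def numSubseqNoGreaterThan(nums: List[int], k: int) -> int:
--     nums.sort()
--     ans = 0
--     l, r = 0, len(nums) - 1
--     while l <= r:
--         if nums[l] + nums[r] <= k:
--             ans += 2 ** (r - l) # 1 + 2**0 + 2**1 + ... + 2**(r-l-1)
--             l += 1
--         else:
--             r -= 1
--     return ans
-- ===== SOURCE B (Python) =====
-- from typing import List
--
-- def numSubseqNoGreaterThan(nums: List[int], k: int) -> int: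
--     nums.sort()
--     n = len(nums)
--     ans = 0
--     for i in range(n):
--         # binary search: lo ends as the number of elements <= k - nums[i]
--         x = k - nums[i]
--         lo, hi = 0, n
--         while lo < hi:
--             mid = (lo + hi) // 2
--             if nums[mid] <= x:
--                 lo = mid + 1
--             else:
--                 hi = mid
--         j = lo - 1  # largest index with nums[i] + nums[j] <= k
--         if j >= i:
--             ans += 2 ** (j - i)
--     return ans
-- ===== Notes on version B (the rewrite author's own statement) =====
-- stated objective: alternative
-- what changed: Replaces A's linear two-pointer sweep (move l up / r down depending on nums[l]+nums[r]<=k) by an independent per-index computation: for each i a hand-written binary search finds the largest j with nums[i]+nums[j]<=k on the sorted list and adds 2**(j-i) when j>=i.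
import Mathlib
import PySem

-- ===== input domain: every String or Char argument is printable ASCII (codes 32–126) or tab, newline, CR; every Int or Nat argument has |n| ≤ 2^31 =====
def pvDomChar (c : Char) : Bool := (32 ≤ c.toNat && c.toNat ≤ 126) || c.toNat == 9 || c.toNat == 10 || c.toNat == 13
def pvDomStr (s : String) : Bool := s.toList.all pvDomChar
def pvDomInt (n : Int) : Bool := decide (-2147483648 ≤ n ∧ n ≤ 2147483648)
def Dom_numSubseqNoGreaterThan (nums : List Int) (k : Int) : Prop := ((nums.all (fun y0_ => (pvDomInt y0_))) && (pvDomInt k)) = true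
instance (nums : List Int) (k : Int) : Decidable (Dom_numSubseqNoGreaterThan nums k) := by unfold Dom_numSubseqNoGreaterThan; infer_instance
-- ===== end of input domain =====

-- B replaces A's two-pointer sweep by, per index i, a hand-written binary search for the
-- largest j with nums[i]+nums[j] ≤ k (objective: alternative algorithm, same return value).
-- Both A and B sort nums in place in Python; the equivalence proved here is about the return value.

-- ===== PORT A =====
-- A's while loop: l, r move inward; indices are always in range, so pyGetD's default is never used.
def pvLoopA (s : List Int) (k : Int) (l r ans : Int) : Int :=
  if l ≤ r then
    if PySem.List.pyGetD s l 0 + PySem.List.pyGetD s r 0 ≤ k then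
      pvLoopA s k (l + 1) r (ans + 2 ^ (r - l).toNat)
    else
      pvLoopA s k l (r - 1) ans
  else ans
  termination_by (r - l + 1).toNat
  decreasing_by all_goals omega

def numSubseqNoGreaterThan (nums : List Int) (k : Int) : Int :=
  let s := PySem.List.sorted nums (fun x => x) false
  pvLoopA s k 0 ((s.length : Int) - 1) 0

-- ===== PORT B =====
-- midpoint bounds, needed for the binary-search loop's termination
theorem pvMidBounds {lo hi : Int} (h : lo < hi) :
    lo ≤ PySem.Int.floordiv (lo + hi) 2 ∧ PySem.Int.floordiv (lo + hi) 2 < hi := by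
  constructor
  · rw [PySem.Int.le_floordiv_iff_mul_le (by omega)]; omega
  · rw [PySem.Int.floordiv_lt_iff_lt_mul (by omega)]; omega

-- B's inner while loop: lo ends as the number of elements of s that are ≤ x (s sorted)
def pvBsLoop (s : List Int) (x : Int) (lo hi : Int) : Int :=
  if h : lo < hi then
    let mid := PySem.Int.floordiv (lo + hi) 2
    if PySem.List.pyGetD s mid 0 ≤ x then pvBsLoop s x (mid + 1) hi
    else pvBsLoop s x lo mid
  else lo
  termination_by (hi - lo).toNat
  decreasing_by
  · have := pvMidBounds h; omega
  · have := pvMidBounds h; omega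

def numSubseqNoGreaterThan_alt (nums : List Int) (k : Int) : Int :=
  let s := PySem.List.sorted nums (fun x => x) false
  let n : Int := (s.length : Int)
  (PySem.List.pyRange 0 n 1).foldl (fun ans i =>
    let x := k - PySem.List.pyGetD s i 0
    let j := pvBsLoop s x 0 n - 1
    if j ≥ i then ans + 2 ^ (j - i).toNat else ans) 0

-- ===== PRECONDITION & SPEC =====
def Spec_numSubseqNoGreaterThan (nums : List Int) (k : Int) (out : Int) : Prop := out = numSubseqNoGreaterThan_alt nums k
instance (nums : List Int) (k : Int) (out : Int) : Decidable (Spec_numSubseqNoGreaterThan nums k out) := by unfold Spec_numSubseqNoGreaterThan; infer_instance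

-- ===== CLAIM (what is proved, stated in full; the proofs are below) =====
def Claim_equal_numSubseqNoGreaterThan : Prop := ∀ (nums : List Int) (k : Int), Dom_numSubseqNoGreaterThan nums k → Spec_numSubseqNoGreaterThan nums k (numSubseqNoGreaterThan nums k)

-- ===== LEMMAS AND PROOFS =====

-- number of elements of s that are ≤ x
def pvCnt (s : List Int) (x : Int) : Nat := s.countP (fun a => decide (a ≤ x))

-- contribution of index i (what B adds for i), and the sum of contributions from index l on
def pvF (s : List Int) (k : Int) (i : Nat) : Int :=
  if ((pvCnt s (k - s.getD i 0) : Int) - 1) ≥ (i : Int) then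
    2 ^ (((pvCnt s (k - s.getD i 0) : Int) - 1 - (i : Int)).toNat)
  else 0

def pvTail (s : List Int) (k : Int) (l : Nat) : Int :=
  if l < s.length then pvF s k l + pvTail s k (l + 1) else 0
  termination_by s.length - l

-- monotone access in a sorted list
theorem pvMono {s : List Int} (hs : s.Pairwise (· ≤ ·)) {i j : Nat}
    (hij : i ≤ j) (hj : j < s.length) : s.getD i 0 ≤ s.getD j 0 := by
  rcases Nat.lt_or_ge i j with h | h
  · have hi : i < s.length := lt_trans h hj
    rw [List.getD_eq_getElem s 0 hi, List.getD_eq_getElem s 0 hj]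
    exact List.pairwise_iff_getElem.mp hs i j hi hj h
  · have : i = j := le_antisymm hij h
    simp [this]

theorem pvCount_eq (P : Int → Bool) (s : List Int) (m : Nat) (hm : m ≤ s.length)
    (h1 : ∀ j, j < m → P (s.getD j 0) = true)
    (h2 : ∀ j, m ≤ j → j < s.length → P (s.getD j 0) = false) :
    s.countP P = m := by
  induction s generalizing m with
  | nil => simp only [List.length_nil] at hm; simp only [List.countP_nil]; omega
  | cons a t ih =>
    cases m with
    | zero =>
      have ha : P a = false := h2 0 (by omega) (by simp)
      have ht : t.countP P = 0 :=
        ih 0 (by omega) (fun j hj => by omega)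
          (fun j _ hj => h2 (j + 1) (by omega) (by simpa using hj))
      simp [ha, ht]
    | succ m =>
      have ha : P a = true := h1 0 (by omega)
      have ht : t.countP P = m :=
        ih m (by simpa using hm)
          (fun j hj => h1 (j + 1) (by omega))
          (fun j hj hj' => h2 (j + 1) (by omega) (by simpa using hj'))
      simp [ha, ht]

theorem pvCount_le (P : Int → Bool) (s : List Int) (m : Nat)
    (h2 : ∀ j, m ≤ j → j < s.length → P (s.getD j 0) = false) :
    s.countP P ≤ m := by
  induction s generalizing m with
  | nil => simp
  | cons a t ih =>
    cases m with
    | zero =>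
      have ha : P a = false := h2 0 (by omega) (by simp)
      have ht : t.countP P ≤ 0 :=
        ih 0 (fun j _ hj => h2 (j + 1) (by omega) (by simpa using hj))
      simpa [ha] using ht
    | succ m =>
      have ht : t.countP P ≤ m :=
        ih m (fun j hj hj' => h2 (j + 1) (by omega) (by simpa using hj'))
      rw [List.countP_cons]
      split <;> omega

-- the binary search computes pvCnt
theorem pvBsLoop_eq (s : List Int) (hs : s.Pairwise (· ≤ ·)) (x : Int)
    (lo hi : Int) (hlo : 0 ≤ lo) (hhi : hi ≤ (s.length : Int)) (hle : lo ≤ hi)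
    (h1 : ∀ j : Nat, (j : Int) < lo → s.getD j 0 ≤ x)
    (h2 : ∀ j : Nat, hi ≤ (j : Int) → j < s.length → ¬ s.getD j 0 ≤ x) :
    pvBsLoop s x lo hi = (pvCnt s x : Int) := by
  rw [pvBsLoop]
  split
  · rename_i h
    have hmb := pvMidBounds h
    set mid := PySem.Int.floordiv (lo + hi) 2 with hmid
    have hmidn : mid.toNat < s.length := by omega
    have hget : PySem.List.pyGetD s mid 0 = s.getD mid.toNat 0 := by
      rw [PySem.List.pyGetD_eq_getElem s 0 (by omega) (by omega), List.getD_eq_getElem s 0 hmidn]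
    dsimp only
    split
    · rename_i hc
      rw [hget] at hc
      exact pvBsLoop_eq s hs x (mid + 1) hi (by omega) hhi (by omega)
        (fun j hj => by
          have : j ≤ mid.toNat := by omega
          exact le_trans (pvMono hs this hmidn) hc)
        h2
    · rename_i hc
      rw [hget] at hc
      exact pvBsLoop_eq s hs x lo mid (by omega) (by omega) (by omega)
        h1
        (fun j hj hjn => by
          have : mid.toNat ≤ j := by omega
          intro hle'
          exact hc (le_trans (pvMono hs this hjn) hle'))
  · rename_i h
    have hlh : lo = hi := by omega
    have : s.countP (fun a => decide (a ≤ x)) = lo.toNat := by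
      refine pvCount_eq _ _ _ (by omega) ?_ ?_
      · intro j hj
        simpa using h1 j (by omega)
      · intro j hj hj'
        simpa using h2 j (by omega) hj'
    unfold pvCnt
    omega
  termination_by (hi - lo).toNat
  decreasing_by all_goals omega

theorem pvTail_zero (s : List Int) (k : Int) (l : Nat)
    (h : ∀ i, l ≤ i → i < s.length → pvF s k i = 0) : pvTail s k l = 0 := by
  rw [pvTail]
  split
  · rename_i hl
    rw [h l (le_refl l) hl, pvTail_zero s k (l + 1) (fun i hi hi' => h i (by omega) hi')]
    ring
  · rfl
  termination_by s.length - l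

-- A's loop, under the two-pointer invariant, computes the tail sum of contributions
theorem pvLoopA_eq (s : List Int) (hs : s.Pairwise (· ≤ ·)) (k : Int)
    (l : Nat) (r : Int) (ans : Int) (hr : r < (s.length : Int))
    (inv : ∀ i j : Nat, l ≤ i → i < s.length → r < (j : Int) → j < s.length →
      ¬ (s.getD i 0 + s.getD j 0 ≤ k)) :
    pvLoopA s k (l : Int) r ans = ans + pvTail s k l := by
  rw [pvLoopA]
  split
  · rename_i hlr
    have hln : l < s.length := by omega
    have hrn : r.toNat < s.length := by omega
    have hgl : PySem.List.pyGetD s (l : Int) 0 = s.getD l 0 := PySem.List.pyGetD_natCast ..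
    have hgr : PySem.List.pyGetD s r 0 = s.getD r.toNat 0 := by
      rw [PySem.List.pyGetD_eq_getElem s 0 (by omega) (by omega), List.getD_eq_getElem s 0 hrn]
    split
    · rename_i hc
      rw [hgl, hgr] at hc
      -- count of elements ≤ k - s[l] is exactly r.toNat + 1
      have hcnt : pvCnt s (k - s.getD l 0) = r.toNat + 1 := by
        refine pvCount_eq _ _ _ (by omega) ?_ ?_
        · intro j hj
          have : s.getD j 0 ≤ s.getD r.toNat 0 := pvMono hs (by omega) hrn
          simp only [decide_eq_true_eq]; omega
        · intro j hj hj'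
          have := inv l j (le_refl l) hln (by omega) hj'
          simp only [decide_eq_false_iff_not]; omega
      have hfl : pvF s k l = 2 ^ (r - (l : Int)).toNat := by
        unfold pvF
        rw [hcnt]
        have hcond : ((r.toNat + 1 : Nat) : Int) - 1 ≥ (l : Int) := by omega
        rw [if_pos hcond]
        congr 1
        omega
      have hrec := pvLoopA_eq s hs k (l + 1) r (ans + 2 ^ (r - (l : Int)).toNat) hr
        (fun i j hi hi' hj hj' => inv i j (by omega) hi' hj hj')
      have hpush : ((l : Int) + 1) = ((l + 1 : Nat) : Int) := by omega
      rw [hpush, hrec]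
      conv_rhs => rw [pvTail]
      rw [if_pos hln, hfl]
      ring
    · rename_i hc
      rw [hgl, hgr] at hc
      have hrec := pvLoopA_eq s hs k l (r - 1) ans (by omega)
        (fun i j hi hi' hj hj' => by
          rcases lt_or_ge r (j : Int) with h' | h'
          · exact inv i j hi hi' h' hj'
          · have hjr : (j : Int) = r := by omega
            have h1 : s.getD l 0 ≤ s.getD i 0 := pvMono hs hi hi'
            have h2 : s.getD j 0 = s.getD r.toNat 0 := by
              congr 1; omega
            omega)
      rw [hrec]
  · rename_i hlr
    have : pvTail s k l = 0 := by
      refine pvTail_zero s k l (fun i hil hin => ?_)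
      unfold pvF
      rw [if_neg]
      have hle : pvCnt s (k - s.getD i 0) ≤ i := by
        refine pvCount_le _ _ _ (fun j hj hj' => ?_)
        have := inv i j hil hin (by omega) hj'
        simp only [decide_eq_false_iff_not]; omega
      omega
    rw [this]
    ring
  termination_by (r - (l : Int) + 1).toNat
  decreasing_by all_goals omega

-- B's fold, from index l on, sums the contributions
theorem pvFoldB_eq (s : List Int) (hs : s.Pairwise (· ≤ ·)) (k : Int)
    (l : Nat) (hl : l ≤ s.length) (ans : Int) :
    (PySem.List.pyRange (l : Int) (s.length : Int) 1).foldl (fun ans i =>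
      let x := k - PySem.List.pyGetD s i 0
      let j := pvBsLoop s x 0 (s.length : Int) - 1
      if j ≥ i then ans + 2 ^ (j - i).toNat else ans) ans = ans + pvTail s k l := by
  set f := (fun (ans i : Int) =>
      let x := k - PySem.List.pyGetD s i 0
      let j := pvBsLoop s x 0 (s.length : Int) - 1
      if j ≥ i then ans + 2 ^ (j - i).toNat else ans) with hf
  rcases Nat.lt_or_ge l s.length with hlt | hge
  · rw [PySem.List.pyRange_one_cons (by omega), List.foldl_cons]
    have hbody : f ans (l : Int) = ans + pvF s k l := by
      rw [hf]
      dsimp only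
      simp only [PySem.List.pyGetD_natCast]
      rw [pvBsLoop_eq s hs (k - s.getD l 0) 0 (s.length : Int) (by omega) (by omega) (by omega)
        (fun j hj => by omega)
        (fun j hj hj' => by omega)]
      unfold pvF
      split
      · rfl
      · ring
    rw [hbody, hf]
    rw [show ((l : Int) + 1) = ((l + 1 : Nat) : Int) from by omega]
    rw [pvFoldB_eq s hs k (l + 1) (by omega) (ans + pvF s k l)]
    conv_rhs => rw [pvTail]
    rw [if_pos hlt]
    ring
  · rw [PySem.List.pyRange_one_eq_nil (by omega), List.foldl_nil]
    conv_rhs => rw [pvTail]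
    rw [if_neg (by omega)]
    ring
  termination_by s.length - l

-- ===== VERDICT (by name: the statement is the Claim_ definition above) =====
theorem numSubseqNoGreaterThan_spec : Claim_equal_numSubseqNoGreaterThan := by
  intro nums k _
  unfold Spec_numSubseqNoGreaterThan numSubseqNoGreaterThan numSubseqNoGreaterThan_alt
  set s := PySem.List.sorted nums (fun x => x) false with hsdef
  have hs : s.Pairwise (· ≤ ·) := PySem.List.sorted_pairwise nums (fun x => x)
  have hA : pvLoopA s k ((0 : Nat) : Int) ((s.length : Int) - 1) 0 = 0 + pvTail s k 0 :=
    pvLoopA_eq s hs k 0 ((s.length : Int) - 1) 0 (by omega)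
      (fun i j _ _ hj hj' => by omega)
  have hB := pvFoldB_eq s hs k 0 (by omega) 0
  simp only [Nat.cast_zero] at hA hB
  rw [hA, hB]
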